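-- pv_equiv track=rewrite | github.com/cyeinfpro/NexusControlPlane | agent/app/intranet_tunnel.py | _pick_weighted_rr_index
-- ===== SOURCE A (Python) =====
-- from typing import Any, Dict, List, Optional, Tuple
--
-- def _pick_weighted_rr_index(weights: List[int], current: List[int]) -> int:
--     if not weights:
--         return 0
--     n = len(weights)
--     if len(current) != n:
--         current[:] = [0] * n
--     total = 0
--     best_idx = 0
--     best_val = None
--     for i in range(n):
--         w = max(1, int(weights[i]))
--         total += w
--         current[i] = int(current[i]) + w
--         val = int(current[i])
--         if best_val is None or val > int(best_val):
--             best_val = val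
--             best_idx = i
--     current[best_idx] = int(current[best_idx]) - int(total)
--     return int(best_idx)
-- ===== SOURCE B (Python) =====
-- def _pick_weighted_rr_index(weights, current):
--     if not weights:
--         return 0
--     n = len(weights)
--     if len(current) != n:
--         current[:] = [0] * n
--     current[:] = [int(c) + max(1, int(w)) for c, w in zip(current, weights)]
--     # stable sort: among equal counters the smaller index comes first,
--     # matching the original's strict-'>' first-maximum tie-break
--     order = sorted(range(n), key=lambda i: -current[i])
--     best = order[0]
--     current[best] -= sum(max(1, int(w)) for w in weights)
--     return best
-- ===== Notes on version B (the rewrite author's own statement) =====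
-- stated objective: alternative
-- what changed: Replaces A's single fused scan carrying (total, best_idx, best_val) state with a sort-then-pick strategy: bump the counters with a zip comprehension, stably sort the indices by descending counter (stability gives the first-maximum tie-break) and take the head, then subtract sum() of the effective weights.
import Mathlib
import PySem

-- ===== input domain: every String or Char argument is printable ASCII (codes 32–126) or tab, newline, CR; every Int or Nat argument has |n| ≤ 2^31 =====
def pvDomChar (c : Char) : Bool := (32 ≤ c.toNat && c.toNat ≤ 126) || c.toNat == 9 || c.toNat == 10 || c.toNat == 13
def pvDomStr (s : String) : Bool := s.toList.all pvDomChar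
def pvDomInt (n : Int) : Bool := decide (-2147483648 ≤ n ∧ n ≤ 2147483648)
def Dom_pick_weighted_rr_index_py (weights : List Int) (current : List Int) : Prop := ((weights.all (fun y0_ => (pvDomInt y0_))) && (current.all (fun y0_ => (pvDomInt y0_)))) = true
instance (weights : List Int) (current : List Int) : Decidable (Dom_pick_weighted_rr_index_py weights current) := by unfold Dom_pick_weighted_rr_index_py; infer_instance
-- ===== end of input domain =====

-- B replaces A's single fused scan (running total / best_idx / best_val state) by sort-then-pick:
-- bump counters with a zip comprehension, stably sort indices by descending counter and take the head
-- (stability = first-maximum tie-break), then subtract the sum of effective weights.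
-- Objective: alternative (O(n log n) sort vs A's O(n) scan). Both A and B mutate `current` in place
-- identically; the equivalence proved is about the return value.


-- ===== PORT A =====
-- loop body of A's for-loop; state = (current, total, best_idx, best_val)
def pvStepA (weights : List Int) (st : List Int × Int × Int × Option Int) (i : Int) :
    List Int × Int × Int × Option Int :=
  let w := max 1 (PySem.List.pyGetD weights i 0)
  let cur' := PySem.List.pySetD st.1 i (PySem.List.pyGetD st.1 i 0 + w)
  let val := PySem.List.pyGetD cur' i 0
  let better : Bool := match st.2.2.2 with
    | none => true
    | some b => decide (val > b)
  (cur', st.2.1 + w, if better then ((i, some val) : Int × Option Int) else (st.2.2.1, st.2.2.2))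

-- return value is best_idx; the final write-back into `current` does not affect it
def pick_weighted_rr_index_py (weights : List Int) (current : List Int) : Int :=
  if weights = [] then 0
  else
    let cur0 := if current.length ≠ weights.length then List.replicate weights.length (0 : Int) else current
    ((PySem.List.pyRange 0 (weights.length : Int) 1).foldl (pvStepA weights)
      (cur0, 0, 0, none)).2.2.1

-- ===== PORT B =====
-- return value is order[0] with order = sorted(range(n), key=lambda i: -current[i]) after the
-- zip-comprehension bump; `total` and the final subtraction do not affect the return value
def pick_weighted_rr_index_py_alt (weights : List Int) (current : List Int) : Int :=
  if weights = [] then 0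
  else
    let cur0 := if current.length ≠ weights.length then List.replicate weights.length (0 : Int) else current
    let cur := List.zipWith (fun c w => c + max 1 w) cur0 weights
    let order := PySem.List.sorted (PySem.List.pyRange 0 (weights.length : Int) 1)
      (fun i => -(PySem.List.pyGetD cur i 0)) false
    order.headD 0

-- ===== PRECONDITION & SPEC =====
def Spec_pick_weighted_rr_index_py (weights : List Int) (current : List Int) (out : Int) : Prop := out = pick_weighted_rr_index_py_alt weights current
instance (weights : List Int) (current : List Int) (out : Int) : Decidable (Spec_pick_weighted_rr_index_py weights current out) := by unfold Spec_pick_weighted_rr_index_py; infer_instance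

-- ===== CLAIM (what is proved, stated in full; the proofs are below) =====
def Claim_equal_pick_weighted_rr_index_py : Prop := ∀ (weights : List Int) (current : List Int), Dom_pick_weighted_rr_index_py weights current → Spec_pick_weighted_rr_index_py weights current (pick_weighted_rr_index_py weights current)

-- ===== LEMMAS AND PROOFS =====

-- the updated counter list after the whole bump pass
def pvCur2 (weights cur0 : List Int) : List Int :=
  List.zipWith (fun c w => c + max 1 w) cur0 weights

def pvKey (weights cur0 : List Int) (i : Int) : Int :=
  PySem.List.pyGetD (pvCur2 weights cur0) i 0

def pvStepB (weights cur0 : List Int) (a : Option Int) (x : Int) : Option Int :=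
  match a with
  | none => some x
  | some m => if pvKey weights cur0 m < pvKey weights cur0 x then some x else some m

lemma pvCur2_length (weights cur0 : List Int) (h : cur0.length = weights.length) :
    (pvCur2 weights cur0).length = weights.length := by
  simp [pvCur2, h]

lemma pvLoop (weights cur0 : List Int) (hlen : cur0.length = weights.length) :
    ∀ (k : Nat) (t : Int) (acc : Option Int), k ≤ weights.length →
    ((PySem.List.pyRange (k : Int) (weights.length : Int) 1).foldl (pvStepA weights)
      ((pvCur2 weights cur0).take k ++ cur0.drop k, t, acc.getD 0,
        acc.map (pvKey weights cur0))).2.2.1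
    = ((PySem.List.pyRange (k : Int) (weights.length : Int) 1).foldl
        (pvStepB weights cur0) acc).getD 0 := by
  have hc2 : (pvCur2 weights cur0).length = weights.length := pvCur2_length weights cur0 hlen
  suffices H : ∀ (d k : Nat) (t : Int) (acc : Option Int), weights.length - k = d → k ≤ weights.length →
      ((PySem.List.pyRange (k : Int) (weights.length : Int) 1).foldl (pvStepA weights)
        ((pvCur2 weights cur0).take k ++ cur0.drop k, t, acc.getD 0,
          acc.map (pvKey weights cur0))).2.2.1
      = ((PySem.List.pyRange (k : Int) (weights.length : Int) 1).foldl
          (pvStepB weights cur0) acc).getD 0 by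
    intro k t acc hk
    exact H (weights.length - k) k t acc rfl hk
  intro d
  induction d with
  | zero =>
    intro k t acc hd hk
    have hnil : PySem.List.pyRange (k : Int) (weights.length : Int) 1 = [] :=
      PySem.List.pyRange_one_eq_nil (by exact_mod_cast Nat.le_of_sub_eq_zero hd)
    simp [hnil]
  | succ d ih =>
    intro k t acc hd hk
    have hklt : k < weights.length := by omega
    have hcons : PySem.List.pyRange (k : Int) (weights.length : Int) 1
        = (k : Int) :: PySem.List.pyRange ((k : Int) + 1) (weights.length : Int) 1 :=
      PySem.List.pyRange_one_cons (by exact_mod_cast hklt)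
    have hcast : ((k : Int) + 1) = (((k + 1 : Nat)) : Int) := by push_cast; ring
    -- evaluate one step of A
    have hgw : PySem.List.pyGetD weights (k : Int) 0 = weights[k] := by
      rw [PySem.List.pyGetD_natCast]; exact List.getD_eq_getElem weights 0 hklt
    have hread : PySem.List.pyGetD ((pvCur2 weights cur0).take k ++ cur0.drop k) (k : Int) 0
        = cur0[k]'(by omega) := by
      rw [PySem.List.pyGetD_natCast,
        List.getD_eq_getElem _ 0 (by simp [hc2, hlen]; omega),
        List.getElem_append_right (by simp [hc2])]
      simp [hc2, Nat.min_eq_left (Nat.le_of_lt hklt)]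
    -- the counter list after writing index k
    have hset : ((pvCur2 weights cur0).take k ++ cur0.drop k).set k
          (cur0[k]'(by omega) + max 1 weights[k])
        = (pvCur2 weights cur0).take (k+1) ++ cur0.drop (k+1) := by
      have hv : (pvCur2 weights cur0)[k]'(by omega) = cur0[k]'(by omega) + max 1 weights[k] := by
        simp [pvCur2]
      apply List.ext_getElem
      · simp [hc2, hlen]; omega
      · intro i h1 h2
        simp only [List.getElem_set, List.getElem_append, List.length_take,
          List.getElem_take, List.getElem_drop, hc2, Nat.min_eq_left (Nat.le_of_lt hklt),
          Nat.min_eq_left hklt]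
        split_ifs with hik h3 h4 <;>
          first
            | rfl
            | omega
            | (subst hik; exact hv.symm)
            | (congr 1; omega)
    have hvalkey : PySem.List.pyGetD ((pvCur2 weights cur0).take (k+1) ++ cur0.drop (k+1)) (k : Int) 0
        = pvKey weights cur0 (k : Int) := by
      rw [pvKey, PySem.List.pyGetD_natCast, PySem.List.pyGetD_natCast,
        List.getD_eq_getElem _ 0 (by simp [hc2, hlen]; omega),
        List.getD_eq_getElem _ 0 (by omega),
        List.getElem_append_left (by simp [hc2]; omega)]
      simp [List.getElem_take]
    have hstep : pvStepA weights
        ((pvCur2 weights cur0).take k ++ cur0.drop k, t, acc.getD 0, acc.map (pvKey weights cur0)) (k : Int)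
        = ((pvCur2 weights cur0).take (k+1) ++ cur0.drop (k+1), t + max 1 weights[k],
            (pvStepB weights cur0 acc (k : Int)).getD 0,
            (pvStepB weights cur0 acc (k : Int)).map (pvKey weights cur0)) := by
      unfold pvStepA
      simp only [hgw, hread, PySem.List.pySetD_natCast]
      rw [show ((pvCur2 weights cur0).take k ++ cur0.drop k).set k
            (cur0[k]'(by omega) + max 1 weights[k])
          = (pvCur2 weights cur0).take (k+1) ++ cur0.drop (k+1) from hset, hvalkey]
      cases acc with
      | none => simp [pvStepB]
      | some m =>
        by_cases hlt : pvKey weights cur0 m < pvKey weights cur0 (k : Int) <;>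
          simp [pvStepB, hlt]
    rw [hcons, hcast, List.foldl_cons, List.foldl_cons, hstep]
    exact ih (k+1) (t + max 1 weights[k]) (pvStepB weights cur0 acc (k : Int)) (by omega) (by omega)

-- head of an insertBy with the strict-< "before" test of a stable sort
lemma pvHead_insertBy {α : Type} (before : α → α → Bool) (x : α) (acc : List α) :
    (PySem.List.insertBy before x acc).head?
      = match acc.head? with
        | none => some x
        | some h => if before x h then some x else some h := by
  cases acc with
  | nil => rfl
  | cons h t =>
    simp only [PySem.List.insertBy, List.head?_cons]
    by_cases hb : before x h = true <;> simp [hb]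

-- head of the insertion-sort foldl = the first-minimum scan
lemma pvHead_foldl_insertBy {α : Type} (before : α → α → Bool) :
    ∀ (xs : List α) (acc : List α),
    (xs.foldl (fun a y => PySem.List.insertBy before y a) acc).head?
      = xs.foldl (fun a y => match a with
          | none => some y
          | some h => if before y h then some y else some h) acc.head? := by
  intro xs
  induction xs with
  | nil => intro acc; rfl
  | cons x t ih =>
    intro acc
    rw [List.foldl_cons, List.foldl_cons, ih, pvHead_insertBy]

-- head of the stable sort = first minimum under the key (= PySem.List.min?)
lemma pvHead_sorted {α : Type} (xs : List α) (key : α → Int) :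
    (PySem.List.sorted xs key false).head? = PySem.List.min? xs key := by
  unfold PySem.List.sorted PySem.List.min?
  simpa using pvHead_foldl_insertBy (fun a b => decide (key a < key b)) xs []

lemma pvHeadD {α : Type} (l : List α) (d : α) : l.headD d = l.head?.getD d := by
  cases l <;> rfl

theorem pv_eq (weights current : List Int) :
    pick_weighted_rr_index_py weights current = pick_weighted_rr_index_py_alt weights current := by
  by_cases hw : weights = []
  · simp [pick_weighted_rr_index_py, pick_weighted_rr_index_py_alt, hw]
  · simp only [pick_weighted_rr_index_py, pick_weighted_rr_index_py_alt, if_neg hw]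
    have hlen : (if current.length ≠ weights.length then List.replicate weights.length (0 : Int)
        else current).length = weights.length := by
      split <;> simp_all
    have h := pvLoop weights _ hlen 0 0 none (Nat.zero_le _)
    simp only [Nat.cast_zero, List.take_zero, List.nil_append, List.drop_zero,
      Option.getD_none, Option.map_none] at h
    rw [h, pvHeadD, pvHead_sorted]
    congr 1
    unfold PySem.List.min? pvStepB
    congr 2
    funext a x
    cases a with
    | none => rfl
    | some m =>
      simp only [pvKey, pvCur2, neg_lt_neg_iff]
      split_ifs <;> rfl

-- ===== VERDICT (by name: the statement is the Claim_ definition above) =====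
theorem pick_weighted_rr_index_py_spec : Claim_equal_pick_weighted_rr_index_py := by
  intro weights current _
  unfold Spec_pick_weighted_rr_index_py
  exact pv_eq weights current
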